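-- pv_equiv track=rewrite | github.com/imdeniil/yandex-mail-mcp | server.py | build_imap_search_criteria
-- ===== SOURCE A (Python) =====
-- def build_imap_search_criteria(query: str) -> list[str]:
--     """
--     Parse user-friendly query into IMAP search criteria with proper quoting.
--
--     Handles: FROM, TO, CC, BCC, SUBJECT, BODY, TEXT
--     These keywords need their values quoted for IMAP.
--     """
--     if not query or query.upper() == "ALL":
--         return ["ALL"]
--
--     # Keywords that need their following value quoted
--     keywords_needing_quotes = {"FROM", "TO", "CC", "BCC", "SUBJECT", "BODY", "TEXT"}
--
--     result = []
--     tokens = query.split()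
--     i = 0
--
--     while i < len(tokens):
--         token = tokens[i]
--         upper_token = token.upper()
--
--         if upper_token in keywords_needing_quotes and i + 1 < len(tokens):
--             # This keyword needs the next value quoted
--             value = tokens[i + 1]
--             # Remove existing quotes if any, then add proper quotes
--             value = value.strip('"\'')
--             result.append(upper_token)
--             result.append(f'"{value}"')
--             i += 2
--         else:
--             result.append(token)
--             i += 1
--
--     return result
-- ===== SOURCE B (Python) =====
-- def _render(group):
--     """Render one group: a lone token stays as-is; a (keyword, value) pair
--     becomes the uppercased keyword plus the requoted value."""
--     tok, val = group
--     if val is None: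
--         return [tok]
--     return [tok.upper(), '"' + val.strip('"\'') + '"']
--
--
-- def build_imap_search_criteria(query: str) -> list[str]:
--     """Staged pipeline: (1) group the tokens of the query into (keyword, value)
--     pairs and lone tokens using iterator consumption, (2) flatten the groups
--     through a rendering function."""
--     if not query or query.upper() == "ALL":
--         return ["ALL"]
--
--     keywords_needing_quotes = {"FROM", "TO", "CC", "BCC", "SUBJECT", "BODY", "TEXT"}
--
--     # stage 1: grouping
--     groups = []
--     it = iter(query.split())
--     for tok in it:
--         if tok.upper() in keywords_needing_quotes:
--             groups.append((tok, next(it, None)))  # None: keyword was last token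
--         else:
--             groups.append((tok, None))
--
--     # stage 2: rendering
--     return [part for g in groups for part in _render(g)]
-- ===== Notes on version B (the rewrite author's own statement) =====
-- stated objective: alternative
-- what changed: Replaced A's single index-arithmetic while-loop with a staged pipeline: first group the tokens into (keyword, value) pairs / lone tokens via iterator consumption, then flatten the intermediate group list through a separate rendering function.
import Mathlib
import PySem

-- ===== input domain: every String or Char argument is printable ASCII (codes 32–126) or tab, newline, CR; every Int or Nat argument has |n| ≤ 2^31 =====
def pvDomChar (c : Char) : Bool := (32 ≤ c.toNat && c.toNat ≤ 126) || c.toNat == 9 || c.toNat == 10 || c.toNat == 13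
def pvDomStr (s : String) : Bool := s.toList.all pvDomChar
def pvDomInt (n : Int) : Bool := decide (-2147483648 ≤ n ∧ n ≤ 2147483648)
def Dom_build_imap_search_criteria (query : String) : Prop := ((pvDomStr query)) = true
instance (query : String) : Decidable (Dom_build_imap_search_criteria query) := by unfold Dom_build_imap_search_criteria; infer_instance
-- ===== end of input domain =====

-- B replaces A's index-driven while-loop by a staged pipeline: group tokens into
-- (keyword, value) pairs / lone tokens, then flatten through a rendering function
-- (objective: alternative, same cost).

-- ===== PORT A =====
def pvKeywords : List String := ["FROM", "TO", "CC", "BCC", "SUBJECT", "BODY", "TEXT"]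

-- A's while-loop over the token index i
def pvLoopA (tokens : List String) (i : Nat) (result : List String) : List String :=
  if i < tokens.length then
    let token := tokens.getD i ""
    let upper_token := PySem.Str.upper token
    if pvKeywords.contains upper_token ∧ i + 1 < tokens.length then
      let value := PySem.Str.stripChars (tokens.getD (i + 1) "") "\"'"
      pvLoopA tokens (i + 2) (result ++ [upper_token, "\"" ++ value ++ "\""])
    else
      pvLoopA tokens (i + 1) (result ++ [token])
  else result
termination_by tokens.length - i

def build_imap_search_criteria (query : String) : List String :=
  if query = "" ∨ PySem.Str.upper query = "ALL" then ["ALL"]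
  else pvLoopA (PySem.Str.split₀ query) 0 []

-- ===== PORT B =====
-- B stage 2: render one group
def pvRender (g : String × Option String) : List String :=
  match g.2 with
  | none => [g.1]
  | some v => [PySem.Str.upper g.1, "\"" ++ PySem.Str.stripChars v "\"'" ++ "\""]

-- B stage 1: the for-loop over the iterator, consuming the value with next(it, None)
def pvGroup : List String → List (String × Option String)
  | [] => []
  | tok :: rest =>
      if pvKeywords.contains (PySem.Str.upper tok) then
        match rest with
        | [] => (tok, none) :: pvGroup []
        | v :: rest' => (tok, some v) :: pvGroup rest'
      else (tok, none) :: pvGroup rest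

def build_imap_search_criteria_alt (query : String) : List String :=
  if query = "" ∨ PySem.Str.upper query = "ALL" then ["ALL"]
  else (pvGroup (PySem.Str.split₀ query)).flatMap pvRender

-- ===== PRECONDITION & SPEC =====
def Spec_build_imap_search_criteria (query : String) (out : List String) : Prop := out = build_imap_search_criteria_alt query
instance (query : String) (out : List String) : Decidable (Spec_build_imap_search_criteria query out) := by unfold Spec_build_imap_search_criteria; infer_instance

-- ===== CLAIM (what is proved, stated in full; the proofs are below) =====
def Claim_equal_build_imap_search_criteria : Prop := ∀ (query : String), Dom_build_imap_search_criteria query → Spec_build_imap_search_criteria query (build_imap_search_criteria query)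

-- ===== LEMMAS AND PROOFS =====

-- common characterisation of both sides, by recursion on the token list
def pvGo : List String → List String
  | [] => []
  | [t] => [t]
  | t :: v :: rest =>
      if pvKeywords.contains (PySem.Str.upper t) then
        PySem.Str.upper t :: ("\"" ++ PySem.Str.stripChars v "\"'" ++ "\"") :: pvGo rest
      else
        t :: pvGo (v :: rest)

theorem pvLoopA_eq_go (tokens : List String) (i : Nat) (result : List String) :
    pvLoopA tokens i result = result ++ pvGo (tokens.drop i) := by
  fun_induction pvLoopA tokens i result with
  | case1 i result h token u hkw value ih =>
      have h2 : i + 1 < tokens.length := hkw.2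
      have hg : tokens[i]?.getD "" = tokens[i] := by
        simp [List.getElem?_eq_getElem h]
      have hg2 : tokens[i+1]?.getD "" = tokens[i+1] := by
        simp [List.getElem?_eq_getElem h2]
      have hk : pvKeywords.contains (PySem.Str.upper tokens[i]) = true := by
        have := hkw.1
        simpa [u, token, List.getD, hg] using this
      rw [ih, List.drop_eq_getElem_cons h, List.drop_eq_getElem_cons h2]
      rw [show pvGo (tokens[i] :: tokens[i+1] :: tokens.drop (i+1+1))
            = PySem.Str.upper tokens[i]
              :: ("\"" ++ PySem.Str.stripChars tokens[i+1] "\"'" ++ "\"")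
              :: pvGo (tokens.drop (i+1+1)) by rw [pvGo, if_pos hk]]
      simp [token, u, value, hg, hg2]
  | case2 i result h token u hkw ih =>
      have hg : tokens[i]?.getD "" = tokens[i] := by
        simp [List.getElem?_eq_getElem h]
      rw [ih, List.drop_eq_getElem_cons h]
      rcases Nat.lt_or_ge (i+1) tokens.length with h2 | h2
      · have hk : ¬ pvKeywords.contains (PySem.Str.upper tokens[i]) = true := by
          intro hc
          refine hkw ⟨?_, h2⟩
          show pvKeywords.contains (PySem.Str.upper (tokens.getD i "")) = true
          simp only [List.getD_eq_getElem?_getD, hg]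
          exact hc
        rw [List.drop_eq_getElem_cons h2]
        rw [show pvGo (tokens[i] :: tokens[i+1] :: tokens.drop (i+1+1))
              = tokens[i] :: pvGo (tokens[i+1] :: tokens.drop (i+1+1)) by
            rw [pvGo, if_neg hk]]
        rw [← List.drop_eq_getElem_cons h2]
        simp [token, hg]
      · have hd : tokens.drop (i+1) = [] := List.drop_eq_nil_of_le h2
        rw [hd]
        simp [pvGo, token, hg]
  | case3 i result h =>
      simp [List.drop_eq_nil_of_le (Nat.le_of_not_lt h), pvGo]

theorem pvGroup_render_eq_go (tokens : List String) :
    (pvGroup tokens).flatMap pvRender = pvGo tokens := by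
  fun_induction pvGo tokens with
  | case1 => simp [pvGroup]
  | case2 t =>
      by_cases hk : pvKeywords.contains (PySem.Str.upper t) = true
      · rw [pvGroup, if_pos hk]; simp [pvRender, pvGroup]
      · rw [pvGroup, if_neg hk]; simp [pvRender, pvGroup]
  | case3 t v rest hk ih =>
      rw [pvGroup, if_pos hk]
      simp [pvRender, ih]
  | case4 t v rest hk ih =>
      rw [pvGroup, if_neg hk]
      simp only [List.flatMap_cons, pvRender, ih]
      rfl

-- ===== VERDICT (by name: the statement is the Claim_ definition above) =====
theorem build_imap_search_criteria_spec : Claim_equal_build_imap_search_criteria := by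
  intro query _
  unfold Spec_build_imap_search_criteria build_imap_search_criteria build_imap_search_criteria_alt
  split_ifs with h
  · rfl
  · rw [pvLoopA_eq_go, List.drop_zero, pvGroup_render_eq_go, List.nil_append]
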